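-- pv_equiv track=rewrite | github.com/oculi-s/Programmers | 스티커 모으기(2).py | solution
-- ===== SOURCE A (Python) =====
-- def solution(sticker):
--     c = [[]]
--     L = len(sticker)
--     for s in range(L):
--         t = []
--         for x in c:
--             if (s or L) -1 not in x and (s+1) % L not in x:
--                 t.append(x+[s])
--         c += t
--     t = []
--     for x in c:
--         t.append(sum(sticker[i] for i in x))
--     return max(t)
-- ===== SOURCE B (Python) =====
-- def solution(sticker):
--     # House-robber DP on a circle: linear max-sum of non-adjacent picks,
--     # run twice (excluding the last / the first element).
--     def rob(xs):
--         a = b = 0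
--         for v in xs:
--             a, b = b, max(b, a + v)
--         return b
--     if len(sticker) < 2:
--         return rob(sticker)
--     return max(rob(sticker[:-1]), rob(sticker[1:]))
-- ===== Notes on version B (the rewrite author's own statement) =====
-- stated objective: faster
-- what changed: Replaced the exponential enumeration of all non-adjacent index subsets of the circle with the linear house-robber dynamic program run twice (once without the last element, once without the first).
import Mathlib
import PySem

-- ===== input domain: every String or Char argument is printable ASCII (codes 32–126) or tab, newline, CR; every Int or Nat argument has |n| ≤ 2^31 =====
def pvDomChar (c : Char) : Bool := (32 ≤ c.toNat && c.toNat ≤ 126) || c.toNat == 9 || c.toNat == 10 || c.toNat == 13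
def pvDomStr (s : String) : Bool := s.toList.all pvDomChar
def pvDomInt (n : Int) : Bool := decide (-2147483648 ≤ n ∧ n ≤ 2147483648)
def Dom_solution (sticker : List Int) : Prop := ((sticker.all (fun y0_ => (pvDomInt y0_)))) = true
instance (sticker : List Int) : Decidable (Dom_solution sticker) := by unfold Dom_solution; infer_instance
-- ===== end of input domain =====

-- B replaces A's exponential enumeration of all non-adjacent index subsets of the circle with the
-- linear house-robber DP run twice (without the last / without the first element); return values are equal.

-- ===== PORT A =====
-- one step of A's outer loop: t = [x+[s] for x in c if …]; c += t
def solStep (L : Int) (c : List (List Int)) (s : Int) : List (List Int) :=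
  c ++ c.foldl (fun t x =>
    if ((if s ≠ 0 then s else L) - 1) ∉ x ∧ (PySem.Int.mod (s + 1) L) ∉ x
    then t ++ [x ++ [s]] else t) []

def solution (sticker : List Int) : Int :=
  let L : Int := sticker.length
  let c := (PySem.List.pyRange 0 L 1).foldl (solStep L) [[]]
  let t := c.map (fun x => (x.map (fun i => PySem.List.pyGetD sticker i 0)).sum)
  -- sticker[i] is always in range here (all indices come from range(L)); max(t): t is never
  -- empty (the empty subset is always in c), so the .getD 0 default is never used
  (PySem.List.max? t (fun y => y)).getD 0

-- ===== PORT B =====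
def robAlt (xs : List Int) : Int :=
  (xs.foldl (fun (p : Int × Int) v => (p.2, max p.2 (p.1 + v))) (0, 0)).2

def solution_alt (sticker : List Int) : Int :=
  if sticker.length < 2 then robAlt sticker
  else max (robAlt (PySem.List.slice sticker none (some (-1))))
           (robAlt (PySem.List.slice sticker (some 1) none))

-- ===== PRECONDITION & SPEC =====
def Spec_solution (sticker : List Int) (out : Int) : Prop := out = solution_alt sticker
instance (sticker : List Int) (out : Int) : Decidable (Spec_solution sticker out) := by unfold Spec_solution; infer_instance

-- ===== CLAIM (what is proved, stated in full; the proofs are below) =====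
def Claim_equal_solution : Prop := ∀ (sticker : List Int), Dom_solution sticker → Spec_solution sticker (solution sticker)

-- ===== LEMMAS AND PROOFS =====

-- Python's a % b for 0 ≤ a < b
lemma pymod_small (a b : Int) (h1 : 0 ≤ a) (h2 : a < b) : PySem.Int.mod a b = a := by
  show Int.fmod a b = a
  rw [Int.fmod_eq_emod, if_pos (Or.inl (by omega))]
  simpa using Int.emod_eq_of_lt h1 h2

lemma pymod_self (a : Int) : PySem.Int.mod a a = 0 := by
  show Int.fmod a a = 0
  simp

-- the canonical enumeration of the non-adjacent subsets of {0,…,n-1} (as increasing Int lists),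
-- in exactly the order A's loop produces them
def P : Nat → List (List Int)
  | 0 => [[]]
  | n + 1 => P n ++ ((P n).filter (fun x => decide (((n : Int) - 1) ∉ x))).map (· ++ [(n : Int)])

-- sum of the picked weights
def sw (w : List Int) (x : List Int) : Int := (x.map (fun i => PySem.List.pyGetD w i 0)).sum

-- max over the enumerated subsets of level k (0 = empty subset is always included)
def bestAt (k : Nat) (w : List Int) : Int := ((P k).map (sw w)).foldl max 0

lemma memP_bound : ∀ (n : Nat) (x : List Int), x ∈ P n → ∀ i ∈ x, 0 ≤ i ∧ i < (n : Int) := by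
  intro n
  induction n with
  | zero => intro x hx i hi; simp [P] at hx; subst hx; simp at hi
  | succ n ih =>
    intro x hx i hi
    simp only [P, List.mem_append, List.mem_map, List.mem_filter] at hx
    rcases hx with hx | ⟨y, ⟨hy, _⟩, rfl⟩
    · have := ih x hx i hi; push_cast; omega
    · rcases List.mem_append.1 hi with h | h
      · have := ih y hy i h; push_cast; omega
      · simp at h; subst h; push_cast; omega

lemma headP (n : Nat) : ∃ r, P n = [] :: r := by
  induction n with
  | zero => exact ⟨[], rfl⟩
  | succ n ih => rcases ih with ⟨r, hr⟩; exact ⟨r ++ _, by simp only [P, hr]; rfl⟩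

-- the members of the enumeration not containing the top index are exactly the previous level
lemma filterP : ∀ k : Nat, (P k).filter (fun x => decide (((k : Int) - 1) ∉ x)) = P (k - 1)
  | 0 => by simp [P]
  | (n + 1) => by
    have hcast : ((n + 1 : Nat) : Int) - 1 = (n : Int) := by push_cast; ring
    simp only [P, List.filter_append, hcast]
    rw [List.filter_eq_self.2, List.filter_eq_nil_iff.2]
    · simp
    · intro x hx
      simp only [List.mem_map, List.mem_filter] at hx
      rcases hx with ⟨y, _, rfl⟩
      simp
    · intro x hx
      have hb := memP_bound n x hx
      simp only [decide_eq_true_eq]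
      intro hmem
      have := (hb _ hmem).2; omega

-- the members not containing 0 are the previous level shifted up by one
lemma shiftP0 : ∀ m : Nat, (P m).filter (fun x => decide ((0 : Int) ∉ x)) = (P (m - 1)).map (List.map (· + (1 : Int)))
  | 0 => by simp [P]
  | 1 => by simp [P]
  | (k + 2) => by
    have ih1 := shiftP0 (k + 1)
    have ih0 := shiftP0 k
    show (P (k+1) ++ ((P (k+1)).filter (fun x => decide ((((k+1) : Nat) : Int) - 1 ∉ x))).map (· ++ [((k+1 : Nat) : Int)])).filter (fun x => decide ((0 : Int) ∉ x))
       = (P k ++ ((P k).filter (fun x => decide (((k : Nat) : Int) - 1 ∉ x))).map (· ++ [((k : Nat) : Int)])).map (List.map (· + (1 : Int)))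
    rw [filterP (k+1), filterP k]
    simp only [Nat.add_sub_cancel, List.filter_append, List.filter_map, List.map_append, List.map_map, ih1, Nat.add_sub_cancel]
    congr 1
    have : ((fun x => decide ((0:Int) ∉ x)) ∘ (· ++ [((k+1 : Nat) : Int)])) = fun y => decide ((0:Int) ∉ y) := by
      funext y
      simp [List.mem_append]
      omega
    rw [this, ih0]
    simp only [List.map_map]
    apply List.map_congr_left
    intro y _
    simp

lemma foldl_max_max (l : List Int) : ∀ a b : Int, l.foldl max (max a b) = max a (l.foldl max b) := by
  induction l with
  | nil => intro a b; rfl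
  | cons x t ih =>
    intro a b
    show t.foldl max (max (max a b) x) = max a (t.foldl max (max b x))
    rw [max_assoc, ih]

lemma foldl_max_map_add (l : List Int) : ∀ (a c : Int), (l.map (· + c)).foldl max (a + c) = l.foldl max a + c := by
  induction l with
  | nil => intro a c; rfl
  | cons x t ih =>
    intro a c
    show (t.map (· + c)).foldl max (max (a + c) (x + c)) = t.foldl max (max a x) + c
    rw [show max (a + c) (x + c) = max a x + c from max_add_add_right a x c, ih]

lemma foldl_max_append (l1 l2 : List Int) : (l1 ++ l2).foldl max 0 = max (l1.foldl max 0) (l2.foldl max 0) := by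
  rw [List.foldl_append]
  have h := foldl_max_max l2 (l1.foldl max 0) 0
  rwa [max_eq_left (PySem.List.le_foldl_max l1 0).1] at h

lemma bestAt_nonneg (k : Nat) (w : List Int) : 0 ≤ bestAt k w := (PySem.List.le_foldl_max _ 0).1

-- max over the sums of level k, each shifted by c, absorbing the empty subset
lemma max_map_add (k : Nat) (w : List Int) (c : Int) :
    (((P k).map (sw w)).map (· + c)).foldl max 0 = max 0 (bestAt k w + c) := by
  rcases headP k with ⟨r, hr⟩
  rw [bestAt, hr]
  simp only [List.map_cons, sw, List.map_nil, List.sum_nil, List.foldl_cons, zero_add]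
  rw [show max (0:Int) c = max 0 (0 + c) from by ring_nf, foldl_max_max, foldl_max_map_add]
  rw [show max (0:Int) 0 = 0 from rfl]

-- the house-robber recurrence of the enumeration maximum
lemma bestAt_succ (k : Nat) (w : List Int) :
    bestAt (k + 1) w = max (bestAt k w) (bestAt (k - 1) w + PySem.List.pyGetD w (k : Int) 0) := by
  have hP : P (k + 1) = P k ++ (P (k-1)).map (· ++ [(k : Int)]) := by
    show P k ++ _ = _
    rw [filterP k]
  rw [bestAt, hP, List.map_append, foldl_max_append]
  have h2 : (P (k-1)).map (fun x => sw w (x ++ [(k : Int)])) = ((P (k-1)).map (sw w)).map (· + PySem.List.pyGetD w (k : Int) 0) := by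
    simp only [List.map_map]
    apply List.map_congr_left
    intro y _
    simp [sw]
  rw [List.map_map]
  show max (bestAt k w) (((P (k-1)).map (fun x => sw w (x ++ [(k : Int)]))).foldl max 0) = _
  rw [h2, max_map_add]
  rw [← max_assoc, max_eq_left (bestAt_nonneg k w)]

-- bestAt only looks at indices < k
lemma bestAt_congr (k : Nat) (w w' : List Int)
    (h : ∀ i : Int, 0 ≤ i → i < (k : Int) → PySem.List.pyGetD w i 0 = PySem.List.pyGetD w' i 0) :
    bestAt k w = bestAt k w' := by
  unfold bestAt
  congr 1
  apply List.map_congr_left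
  intro x hx
  unfold sw
  congr 1
  apply List.map_congr_left
  intro i hi
  have := memP_bound k x hx i hi
  exact h i this.1 this.2

-- indexing bridges
lemma pyGetD_append_lt (w : List Int) (v : Int) (i : Int) (h0 : 0 ≤ i) (h1 : i < (w.length : Int)) :
    PySem.List.pyGetD (w ++ [v]) i 0 = PySem.List.pyGetD w i 0 := by
  lift i to Nat using h0 with m
  rw [PySem.List.pyGetD_natCast, PySem.List.pyGetD_natCast]
  exact List.getD_append _ _ _ _ (by exact_mod_cast h1)

lemma pyGetD_append_last (w : List Int) (v : Int) :
    PySem.List.pyGetD (w ++ [v]) (w.length : Int) 0 = v := by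
  rw [PySem.List.pyGetD_natCast]
  simp [List.getD]

lemma pyGetD_dropLast (w : List Int) (i : Int) (h0 : 0 ≤ i) (h1 : i < (w.length : Int) - 1) :
    PySem.List.pyGetD w.dropLast i 0 = PySem.List.pyGetD w i 0 := by
  lift i to Nat using h0 with m
  rw [PySem.List.pyGetD_natCast, PySem.List.pyGetD_natCast]
  simp only [List.getD_eq_getElem?_getD]
  rw [List.getElem?_dropLast]
  rw [if_pos (by omega)]

lemma pyGetD_drop_one (w : List Int) (m : Nat) :
    PySem.List.pyGetD (w.drop 1) (m : Int) 0 = PySem.List.pyGetD w ((m : Int) + 1) 0 := by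
  rw [PySem.List.pyGetD_natCast, show ((m : Int) + 1) = ((m + 1 : Nat) : Int) from by push_cast; ring, PySem.List.pyGetD_natCast]
  simp only [List.getD_eq_getElem?_getD, List.getElem?_drop]
  norm_num [Nat.add_comm]

-- B's fold carries (best without the last element, best of the whole prefix)
lemma robAlt_pair (w : List Int) :
    w.foldl (fun (p : Int × Int) v => (p.2, max p.2 (p.1 + v))) (0, 0)
      = (bestAt (w.length - 1) w, bestAt w.length w) := by
  induction w using List.reverseRecOn with
  | nil => simp [bestAt, P, sw]
  | append_singleton w v ih =>
    rw [List.foldl_append, ih]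
    simp only [List.foldl_cons, List.foldl_nil]
    have hcongr : ∀ k : Nat, (k : Int) ≤ (w.length : Int) → bestAt k (w ++ [v]) = bestAt k w := by
      intro k hk
      exact bestAt_congr k _ _ (fun i h0 h1 => pyGetD_append_lt w v i h0 (by omega))
    have hlen : (w ++ [v]).length = w.length + 1 := by simp
    apply Prod.ext <;> simp only [hlen]
    · rw [Nat.add_sub_cancel, hcongr w.length le_rfl]
    · rw [bestAt_succ w.length (w ++ [v]), pyGetD_append_last,
          hcongr w.length le_rfl, hcongr (w.length - 1) (by omega)]

lemma robAlt_eq (w : List Int) : robAlt w = bestAt w.length w := by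
  rw [robAlt, robAlt_pair]

-- one non-final step of A's loop is one step of P's recursion
lemma solStep_eq (L : Int) (k : Nat) (hk : (k : Int) + 1 < L) :
    solStep L (P k) (k : Int) = P (k + 1) := by
  rw [solStep, PySem.List.foldl_append_ite (fun x => ((if (k : Int) ≠ 0 then (k : Int) else L) - 1) ∉ x ∧ (PySem.Int.mod ((k : Int) + 1) L) ∉ x) (· ++ [(k : Int)]) (P k) []]
  rw [List.nil_append]
  show P k ++ _ = P k ++ _
  congr 1
  congr 1
  apply List.filter_congr
  intro x hx
  have hb := memP_bound k x hx
  rw [pymod_small _ _ (by omega) hk, decide_eq_decide]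
  rcases Nat.eq_zero_or_pos k with hk0 | hk0
  · subst hk0
    simp only [P, List.mem_singleton] at hx
    subst hx
    simp
  · rw [if_pos (by exact_mod_cast Nat.pos_iff_ne_zero.1 hk0)]
    constructor
    · exact fun h => h.1
    · intro h
      refine ⟨h, fun hmem => ?_⟩
      have := (hb _ hmem).2
      omega

lemma foldA_eq (L : Int) : ∀ (k : Nat), (k : Int) ≤ L - 1 →
    (PySem.List.pyRange 0 (k : Int) 1).foldl (solStep L) [[]] = P k := by
  intro k
  induction k with
  | zero => intro _; simp [PySem.List.pyRange_one_eq_nil, P]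
  | succ k ih =>
    intro hk
    have h1 : ((k + 1 : Nat) : Int) = (k : Int) + 1 := by push_cast; ring
    rw [h1, PySem.List.pyRange_one_succ_right (by omega), List.foldl_append, ih (by omega)]
    simp only [List.foldl_cons, List.foldl_nil]
    exact solStep_eq L k (by omega)

lemma foldl_max_sublist {l1 l2 : List Int} (h : l1.Sublist l2) : l1.foldl max 0 ≤ l2.foldl max 0 := by
  rcases PySem.List.foldl_max_mem l1 0 with h1 | h1
  · rw [h1]; exact (PySem.List.le_foldl_max l2 0).1
  · exact (PySem.List.le_foldl_max l2 0).2 _ (h.mem h1)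

lemma sw_shift (w : List Int) (y : List Int) (hy : ∀ i ∈ y, 0 ≤ i) :
    sw w (y.map (· + (1 : Int))) = sw (w.drop 1) y := by
  unfold sw
  rw [List.map_map]
  apply congrArg
  apply List.map_congr_left
  intro i hi
  lift i to Nat using hy i hi with m
  simp only [Function.comp_apply]
  exact (pyGetD_drop_one w m).symm

-- the last loop step of A, for n ≥ 2: it also forbids index 0 (the circle closes)
lemma solStep_last (n : Nat) (hn : 2 ≤ n) :
    solStep (n : Int) (P (n - 1)) ((n - 1 : Nat) : Int)
      = P (n - 1) ++ (((P (n - 3)).map (List.map (· + (1 : Int)))).map (· ++ [((n - 1 : Nat) : Int)])) := by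
  rw [solStep, PySem.List.foldl_append_ite
        (fun x => ((if ((n - 1 : Nat) : Int) ≠ 0 then ((n - 1 : Nat) : Int) else (n : Int)) - 1) ∉ x ∧ (PySem.Int.mod (((n - 1 : Nat) : Int) + 1) (n : Int)) ∉ x)
        (· ++ [((n - 1 : Nat) : Int)]) (P (n - 1)) []]
  rw [List.nil_append]
  congr 1
  have hmod : PySem.Int.mod (((n - 1 : Nat) : Int) + 1) (n : Int) = 0 := by
    rw [show (((n - 1 : Nat) : Int) + 1) = (n : Int) from by omega]
    exact pymod_self _
  have hif : (if ((n - 1 : Nat) : Int) ≠ 0 then ((n - 1 : Nat) : Int) else (n : Int)) = ((n - 1 : Nat) : Int) := by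
    rw [if_pos]; omega
  have hfe : (fun x : List Int => decide ((((if ((n - 1 : Nat) : Int) ≠ 0 then ((n - 1 : Nat) : Int) else (n : Int)) - 1) ∉ x ∧ (PySem.Int.mod (((n - 1 : Nat) : Int) + 1) (n : Int)) ∉ x)))
        = fun x : List Int => (decide ((((n - 1 : Nat) : Int) - 1) ∉ x)) && (decide ((0 : Int) ∉ x)) := by
    funext x
    rw [hmod, hif]
    simp
  rw [hfe, ← List.filter_filter, shiftP0 (n - 1), List.filter_map]
  congr 1
  have hcomp : ((fun x : List Int => decide ((((n - 1 : Nat) : Int) - 1) ∉ x)) ∘ (List.map (· + (1 : Int))))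
      = fun y : List Int => decide ((((n - 2 : Nat) : Int) - 1) ∉ y) := by
    funext y
    simp only [Function.comp_apply, decide_eq_decide, List.mem_map]
    constructor
    · intro h hm; exact h ⟨_, hm, by push_cast [hn]; omega⟩
    · rintro h ⟨i, hi, hip⟩
      exact h (by rw [show (((n - 2 : Nat) : Int) - 1) = i from by push_cast [hn]; omega]; exact hi)
  rw [show (n - 1 - 1) = n - 2 from by omega, hcomp, filterP (n - 2), show (n - 2 - 1) = n - 3 from by omega]

-- python max over a list whose head is the empty-subset sum 0
lemma maxT_eq (c : List (List Int)) (w : List Int) (r : List (List Int)) (hc : c = [] :: r) :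
    (PySem.List.max? (c.map (fun x => (x.map (fun i => PySem.List.pyGetD w i 0)).sum)) (fun y => y)).getD 0
      = (c.map (sw w)).foldl max 0 := by
  subst hc
  show (PySem.List.max? ((0:Int) :: r.map (sw w)) (fun y => y)).getD 0 = _
  rw [PySem.List.max?_id_cons]
  rfl

lemma big_case (w : List Int) (hn : 2 ≤ w.length) : solution w = solution_alt w := by
  set n := w.length with hlen
  have hA : solution w
      = max (bestAt (n - 1) w)
            (max 0 (bestAt (n - 3) (w.drop 1) + PySem.List.pyGetD w ((n - 1 : Nat) : Int) 0)) := by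
    rw [solution]
    have hr : PySem.List.pyRange 0 (n : Int) 1
        = PySem.List.pyRange 0 ((n - 1 : Nat) : Int) 1 ++ [((n - 1 : Nat) : Int)] := by
      rw [← PySem.List.pyRange_one_succ_right (by positivity)]
      congr 1
      omega
    simp only [← hlen]
    rw [hr, List.foldl_append, foldA_eq (n : Int) (n - 1) (by omega)]
    simp only [List.foldl_cons, List.foldl_nil]
    rw [solStep_last n hn]
    rcases headP (n - 1) with ⟨r, hr1⟩
    rw [maxT_eq _ w (r ++ _) (by rw [hr1]; rfl)]
    rw [List.map_append, foldl_max_append]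
    congr 1
    have hmm : (((P (n - 3)).map (List.map (· + (1 : Int)))).map (· ++ [((n - 1 : Nat) : Int)])).map (sw w)
        = ((P (n - 3)).map (sw (w.drop 1))).map (· + PySem.List.pyGetD w ((n - 1 : Nat) : Int) 0) := by
      simp only [List.map_map]
      apply List.map_congr_left
      intro y hy
      simp only [Function.comp_apply]
      have h1 : sw w ((y.map (· + (1 : Int))) ++ [((n - 1 : Nat) : Int)])
          = sw w (y.map (· + (1 : Int))) + PySem.List.pyGetD w ((n - 1 : Nat) : Int) 0 := by
        unfold sw; simp
      rw [h1, sw_shift w y (fun i hi => (memP_bound _ y hy i hi).1)]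
    rw [hmm, max_map_add]
  have hB : solution_alt w
      = max (bestAt (n - 1) w)
            (max (bestAt (n - 2) (w.drop 1))
                 (bestAt (n - 3) (w.drop 1) + PySem.List.pyGetD w ((n - 1 : Nat) : Int) 0)) := by
    rw [solution_alt, if_neg (by omega)]
    rw [PySem.List.slice_to_neg_one, PySem.List.slice_from_one, robAlt_eq, robAlt_eq]
    congr 1
    · rw [List.length_dropLast, ← hlen]
      exact bestAt_congr _ _ _ (fun i h0 h1 => pyGetD_dropLast w i h0 (by omega))
    · rw [← List.drop_one, List.length_drop, ← hlen]
      rw [show (n - 1) = (n - 2) + 1 from by omega, bestAt_succ]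
      have e1 : bestAt ((n - 2) - 1) (w.drop 1) = bestAt (n - 3) (w.drop 1) := by
        rw [show ((n - 2) - 1) = n - 3 from by omega]
      have e2 : PySem.List.pyGetD (w.drop 1) ((n - 2 : Nat) : Int) 0
          = PySem.List.pyGetD w ((n - 1 : Nat) : Int) 0 := by
        rw [pyGetD_drop_one]
        congr 1
        push_cast [hn]; omega
      rw [e1, e2, show (n - 2 + 1) = n - 1 from by omega]
  rw [hA, hB]
  have hrle : bestAt (n - 2) (w.drop 1) ≤ bestAt (n - 1) w := by
    have h1 : (P (n - 2)).map (sw (w.drop 1)) = ((P (n - 1)).filter (fun x => decide ((0 : Int) ∉ x))).map (sw w) := by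
      rw [shiftP0 (n - 1), show (n - 1 - 1) = n - 2 from by omega, List.map_map]
      apply List.map_congr_left
      intro y hy
      exact (sw_shift w y (fun i hi => (memP_bound _ y hy i hi).1)).symm
    rw [bestAt, h1, bestAt]
    exact foldl_max_sublist (List.Sublist.map _ List.filter_sublist)
  rw [← max_assoc, ← max_assoc, max_eq_left (bestAt_nonneg _ _), max_eq_left hrle]

lemma small0 : solution [] = solution_alt [] := by decide

lemma small1 (a : Int) : solution [a] = solution_alt [a] := by
  show (PySem.List.max? (((PySem.List.pyRange 0 ((([a] : List Int).length : Int)) 1).foldl (solStep (([a] : List Int).length : Int)) [[]]).map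
      (fun x => (x.map (fun i => PySem.List.pyGetD [a] i 0)).sum)) (fun y => y)).getD 0 = _
  rw [show ((([a] : List Int).length : Int)) = 1 from by simp]
  rw [show PySem.List.pyRange 0 1 1 = [(0 : Int)] from by simpa using PySem.List.pyRange_one_singleton (a := 0)]
  simp only [List.foldl_cons, List.foldl_nil]
  rw [show solStep 1 [[]] 0 = [[], [(0:Int)]] from by simp [solStep, PySem.Int.mod]]
  simp only [List.map_cons, List.map_nil, List.sum_nil, List.sum_cons, List.map_cons]
  rw [PySem.List.max?_id_cons]
  simp [solution_alt, robAlt]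

theorem solution_eq_alt : ∀ (st : List Int), solution st = solution_alt st
  | [] => small0
  | [a] => small1 a
  | a :: b :: r => big_case (a :: b :: r) (by simp)

-- ===== VERDICT (by name: the statement is the Claim_ definition above) =====
theorem solution_spec : Claim_equal_solution := by
  intro sticker _
  exact solution_eq_alt sticker
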